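-- pv_equiv track=rewrite | github.com/Premum143/item-master-converter | app.py | pick_item_master_sheet
-- ===== SOURCE A (Python) =====
-- def pick_sheet(sheets):
--     """Return the sheet with the most populated rows."""
--     return max(sheets, key=lambda s: sum(
--         1 for r in sheets[s]
--         if any(v is not None and str(v).strip() for v in r)
--     ))
--
-- def pick_item_master_sheet(sheets):
--     """
--     Return the sheet whose header row contains HSN, UOM/Unit, AND Tax columns.
--     Falls back to pick_sheet() if no such sheet is found.
--     """
--     HSN_KWS = {"hsn", "sac"}
--     UOM_KWS = {"unit", "uom", "measure"}
--     TAX_KWS = {"tax", "gst", "igst"}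
--     for name, rows in sheets.items():
--         for row in rows[:20]:
--             vals = [str(v).strip().lower() for v in row if v is not None and str(v).strip()]
--             has_hsn = any(any(kw in v for kw in HSN_KWS) for v in vals)
--             has_uom = any(any(kw in v for kw in UOM_KWS) for v in vals)
--             has_tax = any(any(kw in v for kw in TAX_KWS) for v in vals)
--             if has_hsn and has_uom and has_tax:
--                 return name
--     return pick_sheet(sheets)
-- ===== SOURCE B (Python) =====
-- def pick_item_master_sheet(sheets):
--     KW_SETS = [{"hsn", "sac"}, {"unit", "uom", "measure"}, {"tax", "gst", "igst"}]
--     for name, rows in sheets.items():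
--         for row in rows[:20]:
--             missing = list(KW_SETS)
--             for v in row:
--                 if v is None:
--                     continue
--                 cell = str(v).strip().lower()
--                 if not cell:
--                     continue
--                 missing = [kws for kws in missing if not any(kw in cell for kw in kws)]
--                 if not missing:
--                     break
--             if not missing:
--                 return name
--     # fallback: sheet with the most populated rows, first wins ties
--     best = None
--     for name in sheets:
--         count = sum(1 for r in sheets[name] if any(v is not None and str(v).strip() for v in r))
--         if best is None or count > best[1]:
--             best = (name, count)
--     return best[0]
-- ===== Notes on version B (the rewrite author's own statement) =====
-- stated objective: alternative
-- what changed: Per header row, B replaces A's vals-list plus three independent any(any(kw in v)) scans by one streaming pass over the cells that filters the still-unmet keyword groups and breaks early once all are met, and replaces the fallback's max(key=...) by an explicit running-best loop over the sheet names.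
-- outside the precondition, e.g. on pick_item_master_sheet({}): A raises ValueError, B raises TypeError
import Mathlib
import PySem

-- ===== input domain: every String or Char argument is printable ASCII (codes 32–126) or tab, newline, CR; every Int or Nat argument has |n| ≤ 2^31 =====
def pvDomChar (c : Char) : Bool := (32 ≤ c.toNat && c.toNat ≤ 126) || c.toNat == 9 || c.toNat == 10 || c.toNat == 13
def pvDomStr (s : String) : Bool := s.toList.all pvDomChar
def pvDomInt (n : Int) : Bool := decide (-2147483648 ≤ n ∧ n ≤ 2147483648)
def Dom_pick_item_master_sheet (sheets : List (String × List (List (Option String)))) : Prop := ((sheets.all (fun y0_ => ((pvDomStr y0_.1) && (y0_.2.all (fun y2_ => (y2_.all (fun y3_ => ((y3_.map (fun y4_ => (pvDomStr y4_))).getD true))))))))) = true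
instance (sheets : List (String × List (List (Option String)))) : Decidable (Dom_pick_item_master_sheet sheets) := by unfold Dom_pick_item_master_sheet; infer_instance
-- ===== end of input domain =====

-- B replaces A's three independent any(any(..)) scans of the header row by one streaming pass
-- that filters the still-unmet keyword groups per cell with early exit, and A's max(key=..)
-- fallback by an explicit running-best loop; objective: alternative (same cost).

-- ===== PORT A =====
-- dict lookup sheets[s]: first match, default (never used on keys coming from the dict itself)
def pvLookupD (sheets : List (String × List (List (Option String)))) (s : String) :
    List (List (Option String)) :=
  match sheets with
  | [] => []
  | (n, r) :: rest => if n == s then r else pvLookupD rest s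

-- sum(1 for r in rows if any(v is not None and str(v).strip() for v in r))  (a 0/1-sum is countP)
def pvCountPopulated (rows : List (List (Option String))) : Nat :=
  rows.countP (fun r => r.any (fun v =>
    match v with
    | none => false
    | some s => !(PySem.Str.strip s == "")))

-- pick_sheet: max(sheets, key=...) over the dict's keys; none = ValueError on an empty dict (excluded by Pre_)
def pick_sheet (sheets : List (String × List (List (Option String)))) : String :=
  match PySem.List.max? (sheets.map Prod.fst) (fun s => pvCountPopulated (pvLookupD sheets s)) with
  | some s => s
  | none => ""

-- vals = [str(v).strip().lower() for v in row if v is not None and str(v).strip()]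
def pvVals (row : List (Option String)) : List String :=
  row.filterMap (fun v =>
    match v with
    | none => none
    | some s => if PySem.Str.strip s == "" then none
                else some (PySem.Str.lower (PySem.Str.strip s)))

-- any(any(kw in v for kw in KWS) for v in vals)
def pvHasAny (kws : List String) (vals : List String) : Bool :=
  vals.any (fun v => kws.any (fun kw => PySem.Str.isIn kw v))

def pvRowMatchA (row : List (Option String)) : Bool :=
  let vals := pvVals row
  pvHasAny ["hsn", "sac"] vals && pvHasAny ["unit", "uom", "measure"] vals &&
    pvHasAny ["tax", "gst", "igst"] vals

-- for name, rows in sheets.items(): for row in rows[:20]: if has_hsn and has_uom and has_tax: return name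
def pvPickLoopA (sheets : List (String × List (List (Option String)))) : Option String :=
  match sheets with
  | [] => none
  | (name, rows) :: rest =>
      if (PySem.List.slice rows none (some 20)).any pvRowMatchA then some name
      else pvPickLoopA rest

def pick_item_master_sheet (sheets : List (String × List (List (Option String)))) : String :=
  match pvPickLoopA sheets with
  | some n => n
  | none => pick_sheet sheets

-- ===== PORT B =====
-- cell = str(v).strip().lower(); skipped when v is None or the cell is empty
def pvCell (v : Option String) : Option String :=
  match v with
  | none => none
  | some s =>
      let t := PySem.Str.lower (PySem.Str.strip s)
      if t == "" then none else some t

def pvKwHit (kws : List String) (cell : String) : Bool :=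
  kws.any (fun kw => PySem.Str.isIn kw cell)

-- streaming pass over the row's cells, filtering the still-unmet keyword groups, break when none left
def pvScanB (row : List (Option String)) (missing : List (List String)) : List (List String) :=
  match row with
  | [] => missing
  | v :: rest =>
      match pvCell v with
      | none => pvScanB rest missing
      | some cell =>
          let m := missing.filter (fun kws => !pvKwHit kws cell)
          if m.isEmpty then m else pvScanB rest m

def pvRowMatchB (row : List (Option String)) : Bool :=
  (pvScanB row [["hsn", "sac"], ["unit", "uom", "measure"], ["tax", "gst", "igst"]]).isEmpty

def pvPickLoopB (sheets : List (String × List (List (Option String)))) : Option String :=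
  match sheets with
  | [] => none
  | (name, rows) :: rest =>
      if (PySem.List.slice rows none (some 20)).any pvRowMatchB then some name
      else pvPickLoopB rest

-- fallback: running best (name, count), first sheet wins ties
def pvFoldBest (keys : List String) (cnt : String → Nat) : Option (String × Nat) :=
  keys.foldl (fun best name =>
    match best with
    | none => some (name, cnt name)
    | some (bn, bc) => if bc < cnt name then some (name, cnt name) else some (bn, bc)) none

def pick_item_master_sheet_alt (sheets : List (String × List (List (Option String)))) : String :=
  match pvPickLoopB sheets with
  | some n => n
  | none =>
      match pvFoldBest (sheets.map Prod.fst)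
          (fun s => pvCountPopulated (pvLookupD sheets s)) with
      | some (n, _) => n
      | none => ""

-- ===== PRECONDITION & SPEC =====
-- Pre_ excludes only the empty dict, on which A's fallback max() raises ValueError (B's best[0] raises too).
def Pre_pick_item_master_sheet (sheets : List (String × List (List (Option String)))) : Prop :=
  sheets ≠ []
instance (sheets : List (String × List (List (Option String)))) : Decidable (Pre_pick_item_master_sheet sheets) := by unfold Pre_pick_item_master_sheet; infer_instance

def pvWitness_pick_item_master_sheet : (List (String × List (List (Option String)))) :=
  [("Sheet1", [[some "hsn", some "uom", some "tax"], [some "1"]])]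

def Spec_pick_item_master_sheet (sheets : List (String × List (List (Option String)))) (out : String) : Prop := out = pick_item_master_sheet_alt sheets
instance (sheets : List (String × List (List (Option String)))) (out : String) : Decidable (Spec_pick_item_master_sheet sheets out) := by unfold Spec_pick_item_master_sheet; infer_instance

-- ===== CLAIM (what is proved, stated in full; the proofs are below) =====
def Claim_equal_pick_item_master_sheet : Prop := ∀ (sheets : List (String × List (List (Option String)))), Dom_pick_item_master_sheet sheets → Pre_pick_item_master_sheet sheets → Spec_pick_item_master_sheet sheets (pick_item_master_sheet sheets)

-- ===== LEMMAS AND PROOFS =====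

theorem pvLower_eq_empty_iff (x : String) : (PySem.Str.lower x = "") ↔ x = "" := by
  constructor <;> intro h
  · have := congrArg String.toList h
    simp [PySem.Str.toList_lower, PySem.Chars.lower] at this
    exact this
  · simp [h]; rfl

-- the two ports extract the same non-empty lowered cells from a row
theorem pvVals_eq_filterMap_pvCell (row : List (Option String)) :
    pvVals row = row.filterMap pvCell := by
  have hf : (fun (v : Option String) =>
      match v with
      | none => none
      | some s => if PySem.Str.strip s == "" then none
                  else some (PySem.Str.lower (PySem.Str.strip s))) = pvCell := by
    funext v
    cases v with
  | none => rfl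
  | some s =>
      simp only [pvCell]
      by_cases h : PySem.Str.strip s = ""
      · simp [h, pvLower_eq_empty_iff]
      · have h' : ¬ PySem.Str.lower (PySem.Str.strip s) = "" :=
          fun hc => h ((pvLower_eq_empty_iff _).mp hc)
        simp [h, h']
  unfold pvVals
  rw [hf]

-- B's streaming filter computes exactly the groups no extracted cell hits
theorem pvScanB_eq (row : List (Option String)) (ms : List (List String)) :
    pvScanB row ms
      = ms.filter (fun kws => !(row.filterMap pvCell).any (fun v => pvKwHit kws v)) := by
  induction row generalizing ms with
  | nil => simp [pvScanB]
  | cons v rest ih =>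
      cases h : pvCell v with
      | none => simp [pvScanB, h, ih]
      | some cell =>
          simp only [pvScanB, h]
          have hsplit :
              (ms.filter (fun kws => !pvKwHit kws cell)).filter
                  (fun kws => !(rest.filterMap pvCell).any (fun v => pvKwHit kws v))
                = ms.filter (fun kws =>
                    !((v :: rest).filterMap pvCell).any (fun w => pvKwHit kws w)) := by
            rw [List.filter_filter]
            simp [h, Bool.and_comm]
          by_cases he : (ms.filter (fun kws => !pvKwHit kws cell)).isEmpty
          · have hnil : ms.filter (fun kws => !pvKwHit kws cell) = [] :=
              List.isEmpty_iff.mp he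
            rw [← hsplit, hnil]
            simp
          · simp only [he, if_neg, ih, Bool.false_eq_true, not_false_iff]
            exact hsplit

theorem pvRowMatch_eq (row : List (Option String)) : pvRowMatchA row = pvRowMatchB row := by
  unfold pvRowMatchA pvRowMatchB
  rw [pvScanB_eq, ← pvVals_eq_filterMap_pvCell]
  have hh : ∀ kws, (pvVals row).any (fun v => pvKwHit kws v) = pvHasAny kws (pvVals row) := by
    intro kws; rfl
  simp only [hh, List.filter]
  cases h1 : pvHasAny ["hsn", "sac"] (pvVals row) <;>
    cases h2 : pvHasAny ["unit", "uom", "measure"] (pvVals row) <;>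
      cases h3 : pvHasAny ["tax", "gst", "igst"] (pvVals row) <;> simp

theorem pvPickLoop_eq (sheets : List (String × List (List (Option String)))) :
    pvPickLoopA sheets = pvPickLoopB sheets := by
  induction sheets with
  | nil => rfl
  | cons p rest ih =>
      obtain ⟨name, rows⟩ := p
      simp only [pvPickLoopA, pvPickLoopB, funext pvRowMatch_eq, ih]

theorem pvFoldBest_eq_max? (keys : List String) (cnt : String → Nat) :
    pvFoldBest keys cnt = (PySem.List.max? keys cnt).map (fun n => (n, cnt n)) := by
  unfold pvFoldBest PySem.List.max?
  rw [show (none : Option (String × Nat))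
        = Option.map (fun n => (n, cnt n)) (none : Option String) from rfl]
  generalize (none : Option String) = acc
  induction keys generalizing acc with
  | nil => rfl
  | cons x t ih =>
      cases acc with
      | none =>
          simp only [List.foldl_cons, Option.map_none]
          exact ih (some x)
      | some m =>
          simp only [List.foldl_cons, Option.map_some]
          by_cases h : cnt m < cnt x
          · simp only [h, if_true]; exact ih (some x)
          · simp only [h, if_false]; exact ih (some m)

-- ===== VERDICT (by name: the statement is the Claim_ definition above) =====
theorem pick_item_master_sheet_spec : Claim_equal_pick_item_master_sheet := by
  intro sheets _ _
  unfold Spec_pick_item_master_sheet pick_item_master_sheet pick_item_master_sheet_alt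
  rw [pvPickLoop_eq]
  cases h : pvPickLoopB sheets with
  | some n => rfl
  | none =>
      simp only [pick_sheet, pvFoldBest_eq_max?]
      cases PySem.List.max? (sheets.map Prod.fst)
          (fun s => pvCountPopulated (pvLookupD sheets s)) with
      | none => rfl
      | some s => rfl
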